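-- pv_equiv track=rewrite | github.com/ka1be/qqq | euler5.py | checkval
-- ===== SOURCE A (Python) =====
-- def checkval(num1):
--     for i in range(1, 21):
--         if (num1 % i) == 0:
--             g = 1
--         else:
--             g = 0
--             break
--     if (g == 1):
--         return True
--     else:
--         return False
-- ===== SOURCE B (Python) =====
-- def checkval(num1):
--     # 232792560 = lcm(1, 2, ..., 20); num1 is divisible by every i in 1..20
--     # exactly when it is divisible by their lcm.
--     return num1 % 232792560 == 0
-- ===== Notes on version B (the rewrite author's own statement) =====
-- stated objective: simpler
-- what changed: Replaced the 1..20 divisibility loop with a single modulus test against lcm(1..20) = 232792560.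
import Mathlib
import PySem

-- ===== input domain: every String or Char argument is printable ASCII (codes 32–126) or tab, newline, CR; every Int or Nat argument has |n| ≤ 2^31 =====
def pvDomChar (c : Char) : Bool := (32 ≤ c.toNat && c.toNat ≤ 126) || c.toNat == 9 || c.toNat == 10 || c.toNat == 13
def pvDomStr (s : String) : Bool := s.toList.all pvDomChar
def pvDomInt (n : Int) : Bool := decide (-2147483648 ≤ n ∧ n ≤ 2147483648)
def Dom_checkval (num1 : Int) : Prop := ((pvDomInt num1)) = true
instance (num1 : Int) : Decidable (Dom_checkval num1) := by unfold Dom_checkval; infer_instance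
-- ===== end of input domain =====

-- B replaces A's 1..20 divisibility loop with a single modulus test against lcm(1..20) = 232792560 (simpler).

-- ===== PORT A =====
-- the `for i in range(1, 21)` loop with its `break`: returns the final value of g
def checkvalLoop (num1 : Int) : List Int → Int → Int
  | [], g => g
  | i :: rest, _ =>
      if PySem.Int.mod num1 i = 0 then checkvalLoop num1 rest 1
      else 0  -- g = 0; break

def checkval (num1 : Int) : Bool :=
  let g := checkvalLoop num1 (PySem.List.pyRange 1 21 1) 0
  if g = 1 then true else false

-- ===== PORT B =====
def checkval_alt (num1 : Int) : Bool :=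
  decide (PySem.Int.mod num1 232792560 = 0)

-- ===== PRECONDITION & SPEC =====
def Spec_checkval (num1 : Int) (out : Bool) : Prop := out = checkval_alt num1
instance (num1 : Int) (out : Bool) : Decidable (Spec_checkval num1 out) := by unfold Spec_checkval; infer_instance

-- ===== CLAIM (what is proved, stated in full; the proofs are below) =====
def Claim_equal_checkval : Prop := ∀ (num1 : Int), Dom_checkval num1 → Spec_checkval num1 (checkval num1)

-- ===== LEMMAS AND PROOFS =====

theorem pyRange_1_21 : PySem.List.pyRange 1 21 1 =
    [1,2,3,4,5,6,7,8,9,10,11,12,13,14,15,16,17,18,19,20] := by decide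

-- lcm(1..20) = 232792560 divides n once the pairwise-coprime factors 16,9,5,7,11,13,17,19 do
theorem lcm_dvd_of_parts (n : Int) (h5 : (5:Int) ∣ n) (h7 : (7:Int) ∣ n) (h9 : (9:Int) ∣ n)
    (h11 : (11:Int) ∣ n) (h13 : (13:Int) ∣ n) (h16 : (16:Int) ∣ n)
    (h17 : (17:Int) ∣ n) (h19 : (19:Int) ∣ n) : (232792560:Int) ∣ n := by
  have d1 : (144:Int) ∣ n :=
    (IsCoprime.mul_dvd ⟨4, -7, by norm_num⟩ h16 h9 : (16*9:Int) ∣ n)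
  have d2 : (720:Int) ∣ n :=
    (IsCoprime.mul_dvd ⟨-1, 29, by norm_num⟩ d1 h5 : (144*5:Int) ∣ n)
  have d3 : (5040:Int) ∣ n :=
    (IsCoprime.mul_dvd ⟨-1, 103, by norm_num⟩ d2 h7 : (720*7:Int) ∣ n)
  have d4 : (55440:Int) ∣ n :=
    (IsCoprime.mul_dvd ⟨-5, 2291, by norm_num⟩ d3 h11 : (5040*11:Int) ∣ n)
  have d5 : (720720:Int) ∣ n :=
    (IsCoprime.mul_dvd ⟨5, -21323, by norm_num⟩ d4 h13 : (55440*13:Int) ∣ n)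
  have d6 : (12252240:Int) ∣ n :=
    (IsCoprime.mul_dvd ⟨7, -296767, by norm_num⟩ d5 h17 : (720720*17:Int) ∣ n)
  exact (IsCoprime.mul_dvd ⟨-4, 2579419, by norm_num⟩ d6 h19 : (12252240*19:Int) ∣ n)

-- each i in 1..20 divides n once 232792560 does (used contrapositively in the break branches)
theorem part_dvd_of_lcm (n i m : Int) (hm : i * m = 232792560) (h : (232792560:Int) ∣ n) :
    i ∣ n := dvd_trans ⟨m, hm.symm⟩ h

-- loop characterisation: the loop returns 1 iff every listed i divides num1 (and the list is nonempty)
theorem loop_spec (num1 : Int) : ∀ (l : List Int) (g : Int),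
    checkvalLoop num1 l g =
      (if ∀ i ∈ l, i ∣ num1 then (if l.isEmpty then g else 1) else 0)
  | [], g => by simp [checkvalLoop]
  | i :: rest, g => by
      rw [checkvalLoop, loop_spec num1 rest 1]
      simp only [PySem.Int.mod_eq_zero_iff_dvd]
      by_cases h : i ∣ num1 <;> by_cases h2 : ∀ j ∈ rest, j ∣ num1 <;>
        simp [h, h2]

-- ===== VERDICT (by name: the statement is the Claim_ definition above) =====
theorem checkval_spec : Claim_equal_checkval := by
  intro num1 _
  unfold Spec_checkval checkval checkval_alt
  rw [pyRange_1_21, loop_spec]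
  simp only [PySem.Int.mod_eq_zero_iff_dvd]
  by_cases hL : (232792560:Int) ∣ num1
  · have hall : ∀ i ∈ ([1,2,3,4,5,6,7,8,9,10,11,12,13,14,15,16,17,18,19,20] : List Int),
        i ∣ num1 := by
      intro i hi
      simp only [List.mem_cons, List.not_mem_nil, or_false] at hi
      rcases hi with rfl|rfl|rfl|rfl|rfl|rfl|rfl|rfl|rfl|rfl|rfl|rfl|rfl|rfl|rfl|rfl|rfl|rfl|rfl|rfl
      · exact one_dvd num1
      · exact part_dvd_of_lcm num1 2 116396280 (by norm_num) hL
      · exact part_dvd_of_lcm num1 3 77597520 (by norm_num) hL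
      · exact part_dvd_of_lcm num1 4 58198140 (by norm_num) hL
      · exact part_dvd_of_lcm num1 5 46558512 (by norm_num) hL
      · exact part_dvd_of_lcm num1 6 38798760 (by norm_num) hL
      · exact part_dvd_of_lcm num1 7 33256080 (by norm_num) hL
      · exact part_dvd_of_lcm num1 8 29099070 (by norm_num) hL
      · exact part_dvd_of_lcm num1 9 25865840 (by norm_num) hL
      · exact part_dvd_of_lcm num1 10 23279256 (by norm_num) hL
      · exact part_dvd_of_lcm num1 11 21162960 (by norm_num) hL
      · exact part_dvd_of_lcm num1 12 19399380 (by norm_num) hL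
      · exact part_dvd_of_lcm num1 13 17907120 (by norm_num) hL
      · exact part_dvd_of_lcm num1 14 16628040 (by norm_num) hL
      · exact part_dvd_of_lcm num1 15 15519504 (by norm_num) hL
      · exact part_dvd_of_lcm num1 16 14549535 (by norm_num) hL
      · exact part_dvd_of_lcm num1 17 13693680 (by norm_num) hL
      · exact part_dvd_of_lcm num1 18 12932920 (by norm_num) hL
      · exact part_dvd_of_lcm num1 19 12252240 (by norm_num) hL
      · exact part_dvd_of_lcm num1 20 11639628 (by norm_num) hL
    rw [if_pos hall]
    simp [hL]
  · have hnall : ¬ ∀ i ∈ ([1,2,3,4,5,6,7,8,9,10,11,12,13,14,15,16,17,18,19,20] : List Int),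
        i ∣ num1 := fun hall =>
      hL (lcm_dvd_of_parts num1 (hall 5 (by simp)) (hall 7 (by simp)) (hall 9 (by simp))
        (hall 11 (by simp)) (hall 13 (by simp)) (hall 16 (by simp)) (hall 17 (by simp))
        (hall 19 (by simp)))
    rw [if_neg hnall]
    simp [hL]
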